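-- pv_equiv track=rewrite | github.com/imehc/mcp_qa | mcp_server/indexing/search.py | _create_keyword_highlight
-- ===== SOURCE A (Python) =====
-- from typing import List, Dict, Any, Optional
--
-- def _create_keyword_highlight(content: str, keywords: List[str], max_length: int = 200) -> str:
--     """创建显示关键词匹配的高亮片段。"""
--     if not keywords:
--         return content[:max_length] + ("..." if len(content) > max_length else "")
--
--     content_lower = content.lower()
--
--     # 查找第一个关键词匹配
--     earliest_pos = len(content)
--     for keyword in keywords:
--         pos = content_lower.find(keyword.lower())
--         if pos != -1 and pos < earliest_pos:
--             earliest_pos = pos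
--
--     if earliest_pos == len(content):
--         # 未找到匹配
--         return content[:max_length] + ("..." if len(content) > max_length else "")
--
--     # 在第一个匹配周围创建片段
--     start = max(0, earliest_pos - max_length // 4)
--     end = min(len(content), earliest_pos + max_length)
--
--     snippet = content[start:end]
--
--     # 如需要添加省略号
--     if start > 0:
--         snippet = "..." + snippet
--     if end < len(content):
--         snippet = snippet + "..."
--
--     return snippet
-- ===== SOURCE B (Python) =====
-- from typing import List
--
--
-- def _first_hit(content_lower, keywords_lower):
--     """Leftmost index where any (lowercased) keyword starts, or None."""
--     for i in range(len(content_lower)):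
--         if any(content_lower.startswith(k, i) for k in keywords_lower):
--             return i
--     return None
--
--
-- def _create_keyword_highlight(content: str, keywords: List[str], max_length: int = 200) -> str:
--     truncated = content[:max_length] + ("..." if len(content) > max_length else "")
--     if not keywords:
--         return truncated
--
--     pos = _first_hit(content.lower(), [k.lower() for k in keywords])
--     if pos is None:
--         return truncated
--
--     start = max(0, pos - max_length // 4)
--     end = min(len(content), pos + max_length)
--     snippet = content[start:end]
--     if start > 0:
--         snippet = "..." + snippet
--     if end < len(content):
--         snippet = snippet + "..."
--     return snippet
-- ===== Notes on version B (the rewrite author's own statement) =====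
-- stated objective: alternative
-- what changed: Replaces the per-keyword str.find scan with running-minimum tracking by a single left-to-right scan over character positions that returns the first index where any lowercased keyword starts, stopping at the first hit instead of always running every keyword's full find; the snippet construction is unchanged.
import Mathlib
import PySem

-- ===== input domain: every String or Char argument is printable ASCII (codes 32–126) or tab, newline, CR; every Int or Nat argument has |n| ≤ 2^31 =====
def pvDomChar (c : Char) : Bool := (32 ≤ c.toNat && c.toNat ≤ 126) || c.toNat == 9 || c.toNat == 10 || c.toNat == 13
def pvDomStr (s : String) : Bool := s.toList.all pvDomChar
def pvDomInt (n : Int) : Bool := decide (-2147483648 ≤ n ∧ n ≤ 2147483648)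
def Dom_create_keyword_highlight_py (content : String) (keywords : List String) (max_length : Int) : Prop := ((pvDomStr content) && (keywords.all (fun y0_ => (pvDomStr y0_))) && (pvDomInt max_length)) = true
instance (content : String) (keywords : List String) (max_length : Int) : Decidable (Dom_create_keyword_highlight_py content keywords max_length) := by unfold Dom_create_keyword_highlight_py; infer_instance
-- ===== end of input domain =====

-- B replaces A's per-keyword find + running-minimum loop with a single left-to-right
-- position scan returning the first index where any lowercased keyword starts (objective: alternative).


-- ===== PORT A =====
def create_keyword_highlight_py (content : String) (keywords : List String) (max_length : Int) : String :=
  let cs := content.toList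
  if keywords = [] then
    String.ofList (PySem.List.slice cs none (some max_length) ++
      (if max_length < (cs.length : Int) then "...".toList else []))
  else
    let cl := PySem.Chars.lower cs
    let earliest := keywords.foldl (fun e k =>
      let pos := PySem.Chars.find cl (PySem.Chars.lower k.toList)
      if pos ≠ -1 ∧ pos < e then pos else e) (cs.length : Int)
    if earliest = (cs.length : Int) then
      String.ofList (PySem.List.slice cs none (some max_length) ++
        (if max_length < (cs.length : Int) then "...".toList else []))
    else
      let start := max 0 (earliest - PySem.Int.floordiv max_length 4)
      let stop := min (cs.length : Int) (earliest + max_length)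
      let snippet := PySem.List.slice cs (some start) (some stop)
      let snippet := if 0 < start then "...".toList ++ snippet else snippet
      let snippet := if stop < (cs.length : Int) then snippet ++ "...".toList else snippet
      String.ofList snippet

-- ===== PORT B =====
-- cl.startswith(k, i) with 0 ≤ i ≤ len(cl) is exactly 'k is a prefix of cl.drop i'.
def pvFirstHit (cl : List Char) (kl : List (List Char)) : Option Nat :=
  (List.range cl.length).find? (fun i => kl.any (fun k => PySem.Chars.startswith (cl.drop i) k))

def create_keyword_highlight_py_alt (content : String) (keywords : List String) (max_length : Int) : String :=
  let cs := content.toList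
  let truncated := PySem.List.slice cs none (some max_length) ++
      (if max_length < (cs.length : Int) then "...".toList else [])
  if keywords = [] then String.ofList truncated
  else
    match pvFirstHit (PySem.Chars.lower cs) (keywords.map (fun k => PySem.Chars.lower k.toList)) with
    | none => String.ofList truncated
    | some pos =>
      let start := max 0 ((pos : Int) - PySem.Int.floordiv max_length 4)
      let stop := min (cs.length : Int) ((pos : Int) + max_length)
      let snippet := PySem.List.slice cs (some start) (some stop)
      let snippet := if 0 < start then "...".toList ++ snippet else snippet
      let snippet := if stop < (cs.length : Int) then snippet ++ "...".toList else snippet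
      String.ofList snippet

-- ===== PRECONDITION & SPEC =====
def Spec_create_keyword_highlight_py (content : String) (keywords : List String) (max_length : Int) (out : String) : Prop := out = create_keyword_highlight_py_alt content keywords max_length
instance (content : String) (keywords : List String) (max_length : Int) (out : String) : Decidable (Spec_create_keyword_highlight_py content keywords max_length out) := by unfold Spec_create_keyword_highlight_py; infer_instance

-- ===== CLAIM (what is proved, stated in full; the proofs are below) =====
def Claim_equal_create_keyword_highlight_py : Prop := ∀ (content : String) (keywords : List String) (max_length : Int), Dom_create_keyword_highlight_py content keywords max_length → Spec_create_keyword_highlight_py content keywords max_length (create_keyword_highlight_py content keywords max_length)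

-- ===== LEMMAS AND PROOFS =====

-- A's fold: a running minimum of the found positions, seeded with e.
lemma pv_fold_props (cl : List Char) (ks : List (List Char)) (e : Int) :
    (ks.foldl (fun e k => if PySem.Chars.find cl k ≠ -1 ∧ PySem.Chars.find cl k < e then PySem.Chars.find cl k else e) e) ≤ e ∧
    (∀ k ∈ ks, 0 ≤ PySem.Chars.find cl k →
      (ks.foldl (fun e k => if PySem.Chars.find cl k ≠ -1 ∧ PySem.Chars.find cl k < e then PySem.Chars.find cl k else e) e) ≤ PySem.Chars.find cl k) ∧
    ((ks.foldl (fun e k => if PySem.Chars.find cl k ≠ -1 ∧ PySem.Chars.find cl k < e then PySem.Chars.find cl k else e) e) = e ∨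
      ∃ k ∈ ks, (ks.foldl (fun e k => if PySem.Chars.find cl k ≠ -1 ∧ PySem.Chars.find cl k < e then PySem.Chars.find cl k else e) e) = PySem.Chars.find cl k ∧
        0 ≤ PySem.Chars.find cl k) := by
  induction ks generalizing e with
  | nil => simp
  | cons k t ih =>
    simp only [List.foldl_cons]
    have hm1 := PySem.Chars.neg_one_le_find cl k
    by_cases hc : PySem.Chars.find cl k ≠ -1 ∧ PySem.Chars.find cl k < e
    · simp only [if_pos hc]
      obtain ⟨h1, h2, h3⟩ := ih (PySem.Chars.find cl k)
      refine ⟨le_trans h1 (le_of_lt hc.2), ?_, ?_⟩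
      · intro k' hk' hf
        rcases List.mem_cons.mp hk' with hk' | hk'
        · subst hk'; exact h1
        · exact h2 k' hk' hf
      · rcases h3 with h | ⟨k', hk', hh1, hh2⟩
        · exact Or.inr ⟨k, List.mem_cons_self, h, by omega⟩
        · exact Or.inr ⟨k', List.mem_cons_of_mem _ hk', hh1, hh2⟩
    · simp only [if_neg hc]
      obtain ⟨h1, h2, h3⟩ := ih e
      refine ⟨h1, ?_, ?_⟩
      · intro k' hk' hf
        rcases List.mem_cons.mp hk' with hk' | hk'
        · subst hk'
          have : e ≤ PySem.Chars.find cl k' := by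
            by_contra hlt
            exact hc ⟨by omega, by omega⟩
          exact le_trans h1 this
        · exact h2 k' hk' hf
      · rcases h3 with h | ⟨k', hk', hh1, hh2⟩
        · exact Or.inl h
        · exact Or.inr ⟨k', List.mem_cons_of_mem _ hk', hh1, hh2⟩

-- find? over range: none means no index satisfies the predicate.
lemma pv_find?_range_none {n : Nat} {p : Nat → Bool} (h : (List.range n).find? p = none) :
    ∀ j < n, p j = false := by
  intro j hj
  have := List.find?_eq_none.mp h j (List.mem_range.mpr hj)
  simpa using this

-- find? over range finds the least index satisfying the predicate.
lemma pv_find?_range_some {n : Nat} {p : Nat → Bool} {i : Nat}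
    (h : (List.range n).find? p = some i) :
    i < n ∧ p i = true ∧ ∀ j < i, p j = false := by
  induction n with
  | zero => simp at h
  | succ m ih =>
    rw [List.range_succ, List.find?_append] at h
    cases hm : (List.range m).find? p with
    | some j =>
      rw [hm] at h
      simp only [Option.some_or] at h
      obtain rfl : j = i := by injection h
      obtain ⟨h1, h2, h3⟩ := ih hm
      exact ⟨Nat.lt_succ_of_lt h1, h2, h3⟩
    | none =>
      rw [hm] at h
      simp only [Option.none_or] at h
      have hnone := pv_find?_range_none hm
      cases hpm : p m with
      | false => simp [List.find?, hpm] at h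
      | true =>
        simp only [List.find?, hpm] at h
        obtain rfl : m = i := by injection h
        exact ⟨Nat.lt_succ_self _, hpm, hnone⟩

lemma pv_len_lower (cs : List Char) : (PySem.Chars.lower cs).length = cs.length := by
  simp [PySem.Chars.lower]

lemma pv_prefix_drop_infix {k cl : List Char} {i : Nat} (h : k <+: cl.drop i) : k <:+: cl := by
  obtain ⟨t, ht⟩ := h
  exact ⟨cl.take i, t, by rw [List.append_assoc, ht, List.take_append_drop]⟩

-- the central equivalence: A's running minimum equals B's first-hit scan.
lemma pv_key (cl : List Char) (ks : List (List Char)) :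
    (match (List.range cl.length).find? (fun i => ks.any (fun k => PySem.Chars.startswith (cl.drop i) k)) with
     | none => (ks.foldl (fun e k => if PySem.Chars.find cl k ≠ -1 ∧ PySem.Chars.find cl k < e then PySem.Chars.find cl k else e) (cl.length : Int)) = (cl.length : Int)
     | some i => (ks.foldl (fun e k => if PySem.Chars.find cl k ≠ -1 ∧ PySem.Chars.find cl k < e then PySem.Chars.find cl k else e) (cl.length : Int)) = (i : Int) ∧ i < cl.length) := by
  obtain ⟨h1, h2, h3⟩ := pv_fold_props cl ks (cl.length : Int)
  cases hf : (List.range cl.length).find? (fun i => ks.any (fun k => PySem.Chars.startswith (cl.drop i) k)) with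
  | none =>
    have hnone := pv_find?_range_none hf
    rcases h3 with h | ⟨k, hk, hEk, hE0⟩
    · exact h
    · by_contra hne
      have hle : PySem.Chars.find cl k ≤ (cl.length : Int) := PySem.Chars.find_le_length cl k
      have hlt : PySem.Chars.find cl k < (cl.length : Int) := by
        rw [← hEk] at hle ⊢
        exact lt_of_le_of_ne hle hne
      have hspec := (PySem.Chars.find_spec (s := cl) (sub := k) hE0).1
      have hnat : (PySem.Chars.find cl k).toNat < cl.length := by omega
      have := hnone _ hnat
      rw [List.any_eq_false] at this
      exact this k hk ((PySem.Chars.startswith_iff _ _).mpr hspec)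
  | some i =>
    obtain ⟨hin, hpi, hmin⟩ := pv_find?_range_some hf
    rw [List.any_eq_true] at hpi
    obtain ⟨k, hk, hsw⟩ := hpi
    have hpre : k <+: cl.drop i := (PySem.Chars.startswith_iff _ _).mp hsw
    have hfind0 : 0 ≤ PySem.Chars.find cl k :=
      (PySem.Chars.find_nonneg_iff cl k).mpr (pv_prefix_drop_infix hpre)
    have hspec := PySem.Chars.find_spec (s := cl) (sub := k) hfind0
    have hfle : (PySem.Chars.find cl k).toNat ≤ i := by
      by_contra hgt
      exact hspec.2 i (by omega) hpre
    have hEle : (ks.foldl (fun e k => if PySem.Chars.find cl k ≠ -1 ∧ PySem.Chars.find cl k < e then PySem.Chars.find cl k else e) (cl.length : Int)) ≤ (i : Int) :=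
      le_trans (h2 k hk hfind0) (by omega)
    refine ⟨?_, hin⟩
    rcases h3 with h | ⟨k0, hk0, hEk0, hE00⟩
    · omega
    · have hs0 := (PySem.Chars.find_spec (s := cl) (sub := k0) hE00).1
      have hnotlt : ¬ ((PySem.Chars.find cl k0).toNat < i) := by
        intro hlt
        have := hmin _ hlt
        rw [List.any_eq_false] at this
        exact this k0 hk0 ((PySem.Chars.startswith_iff _ _).mpr hs0)
      omega

-- ===== VERDICT (by name: the statement is the Claim_ definition above) =====
theorem create_keyword_highlight_py_spec : Claim_equal_create_keyword_highlight_py := by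
  intro content keywords max_length _
  unfold Spec_create_keyword_highlight_py
  by_cases hk : keywords = []
  · simp [create_keyword_highlight_py, create_keyword_highlight_py_alt, hk]
  · have hkey := pv_key (PySem.Chars.lower content.toList)
      (keywords.map (fun k => PySem.Chars.lower k.toList))
    rw [List.foldl_map] at hkey
    rw [pv_len_lower content.toList] at hkey
    simp only [create_keyword_highlight_py, create_keyword_highlight_py_alt, pvFirstHit,
      pv_len_lower, if_neg hk]
    cases hf : (List.range content.toList.length).find?
        (fun i => (keywords.map (fun k => PySem.Chars.lower k.toList)).any
          (fun k => PySem.Chars.startswith ((PySem.Chars.lower content.toList).drop i) k)) with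
    | none =>
      rw [hf] at hkey
      simp only at hkey
      rw [if_pos hkey]
    | some i =>
      rw [hf] at hkey
      simp only at hkey
      rw [hkey.1, if_neg (by have := hkey.2; omega)]
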